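-- pv_equiv track=rewrite | github.com/alekseik1/python_mipt_study | From_George/pref_func.py | prefix
-- ===== SOURCE A (Python) =====
-- def prefix(s):
--     n = len(s)
--     pi = [0]*n
--     for i in range(1, len(s)):
--         temp = pi[i-1]
--         while temp > 0 and s[i] != s[temp]:
--             temp -= 1
--         if s[i] == s[temp]:
--             pi[i] = pi[i-1] + 1
--         else:
--             pi[i] = 0
--     return pi
-- ===== SOURCE B (Python) =====
-- def prefix(s):
--     # O(n): pi[i] = pi[i-1] + 1 iff some position t <= pi[i-1] holds s[i],
--     # i.e. iff the first occurrence of s[i] is at index <= pi[i-1].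
--     first = {}
--     pi = []
--     prev = 0
--     for i, c in enumerate(s):
--         if c not in first:
--             first[c] = i
--         prev = 0 if i == 0 else (prev + 1 if first[c] <= prev else 0)
--         pi.append(prev)
--     return pi
-- ===== Notes on version B (the rewrite author's own statement) =====
-- stated objective: alternative
-- what changed: A rescans backwards from pi[i-1] at each position (worst-case quadratic); B is a single pass that keeps each character's first-occurrence index in a dict, using the fact that pi[i]=pi[i-1]+1 exactly when the first occurrence of s[i] is at index <= pi[i-1].
import Mathlib
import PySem

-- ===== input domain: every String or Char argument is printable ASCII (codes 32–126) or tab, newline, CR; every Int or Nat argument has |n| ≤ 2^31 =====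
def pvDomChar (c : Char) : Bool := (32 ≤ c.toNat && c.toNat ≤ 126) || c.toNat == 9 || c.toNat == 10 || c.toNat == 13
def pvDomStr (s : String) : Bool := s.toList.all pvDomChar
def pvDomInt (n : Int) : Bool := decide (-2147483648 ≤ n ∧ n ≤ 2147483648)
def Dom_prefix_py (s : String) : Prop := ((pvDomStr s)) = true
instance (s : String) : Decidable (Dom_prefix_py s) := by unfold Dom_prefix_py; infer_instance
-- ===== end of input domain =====

-- B replaces A's per-position backward while-scan by a single pass that keeps each
-- character's first-occurrence index in a dict (A's pi[i] is pi[i-1]+1 exactly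
-- when s[i] occurs at some position ≤ pi[i-1], i.e. when its first occurrence is ≤ pi[i-1]).

-- ===== PORT A =====
-- the while loop 'while temp > 0 and s[i] != s[temp]: temp -= 1' (ci = s[i]);
-- all indices A uses are in range, so list.getD with a dummy default is exact here.
def prefixWhileA (sl : List Char) (ci : Char) : Nat → Nat
  | 0 => 0
  | t + 1 => if ci ≠ sl.getD (t + 1) ' ' then prefixWhileA sl ci t else t + 1

def prefix_py (s : String) : List Int :=
  let sl := s.toList
  let n := sl.length
  (List.range' 1 (n - 1)).foldl
    (fun pi i =>
      let temp := prefixWhileA sl (sl.getD i ' ') (pi.getD (i - 1) 0).toNat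
      if sl.getD i ' ' = sl.getD temp ' ' then pi.set i (pi.getD (i - 1) 0 + 1)
      else pi.set i 0)
    (List.replicate n 0)

-- ===== PORT B =====
def prefix_py_alt (s : String) : List Int :=
  ((PySem.List.enumerate s.toList).foldl
    (fun (st : PySem.Dict Char Int × Int × List Int) p =>
      let first := if st.1.contains p.2 then st.1 else st.1.insert p.2 p.1
      let prev : Int := if p.1 = 0 then 0
                        else if first.getD p.2 0 ≤ st.2.1 then st.2.1 + 1 else 0
      (first, prev, st.2.2 ++ [prev]))
    (PySem.Dict.empty, 0, [])).2.2

-- ===== PRECONDITION & SPEC =====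
def Spec_prefix_py (s : String) (out : List Int) : Prop := out = prefix_py_alt s
instance (s : String) (out : List Int) : Decidable (Spec_prefix_py s out) := by unfold Spec_prefix_py; infer_instance

-- ===== CLAIM (what is proved, stated in full; the proofs are below) =====
def Claim_equal_prefix_py : Prop := ∀ (s : String), Dom_prefix_py s → Spec_prefix_py s (prefix_py s)

-- ===== LEMMAS AND PROOFS =====

-- the common recurrence both programs compute: refv sl i is pi[i]
def refv (sl : List Char) : Nat → Int
  | 0 => 0
  | i + 1 =>
    if (List.range ((refv sl i).toNat + 1)).any (fun t => sl.getD t ' ' == sl.getD (i + 1) ' ')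
    then refv sl i + 1 else 0

lemma refv_nonneg (sl : List Char) (i : Nat) : 0 ≤ refv sl i := by
  induction i with
  | zero => simp [refv]
  | succ i ih => rw [refv]; split <;> omega

-- A's while loop finds a matching position iff one exists at index ≤ temp
lemma prefixWhileA_iff (sl : List Char) (ci : Char) (temp : Nat) :
    (ci = sl.getD (prefixWhileA sl ci temp) ' ') ↔ ∃ t ≤ temp, sl.getD t ' ' = ci := by
  induction temp with
  | zero =>
    simp only [prefixWhileA]
    constructor
    · intro h; exact ⟨0, le_refl _, h.symm⟩
    · rintro ⟨t, ht, h⟩; interval_cases t; exact h.symm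
  | succ t ih =>
    rw [prefixWhileA]
    by_cases h : ci = sl.getD (t + 1) ' '
    · rw [if_neg (by simpa using h)]
      constructor
      · intro _; exact ⟨t + 1, le_refl _, h.symm⟩
      · intro _; exact h
    · rw [if_pos (by simpa using h), ih]
      constructor
      · rintro ⟨u, hu, he⟩; exact ⟨u, hu.trans (Nat.le_succ t), he⟩
      · rintro ⟨u, hu, he⟩
        rcases Nat.lt_succ_iff_lt_or_eq.mp (Nat.lt_succ_of_le hu) with h' | h'
        · exact ⟨u, Nat.lt_succ_iff.mp h', he⟩
        · exact absurd he (h' ▸ fun he' => h he'.symm)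

-- invariant for B's dict: it records, for each char, its first occurrence among sl[0..k-1]
def InvFirst (sl : List Char) (k : Nat) (first : PySem.Dict Char Int) : Prop :=
  ∀ d : Char,
    (first.get? d = none → ∀ t < k, sl.getD t ' ' ≠ d) ∧
    (∀ j, first.get? d = some j →
      ∃ m : Nat, j = (m : Int) ∧ m < k ∧ sl.getD m ' ' = d ∧ ∀ t < m, sl.getD t ' ' ≠ d)

lemma lemmaA (sl : List Char) (hsl : 1 ≤ sl.length) (k : Nat) (hk : k ≤ sl.length - 1) :
    (List.range' 1 k).foldl
      (fun pi i =>
        let temp := prefixWhileA sl (sl.getD i ' ') (pi.getD (i - 1) 0).toNat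
        if sl.getD i ' ' = sl.getD temp ' ' then pi.set i (pi.getD (i - 1) 0 + 1)
        else pi.set i 0)
      (List.replicate sl.length 0)
    = (List.range (k + 1)).map (refv sl) ++ List.replicate (sl.length - (k + 1)) (0 : Int) := by
  induction k with
  | zero =>
    simp only [List.range'_zero, List.foldl_nil]
    have h1 : sl.length = (sl.length - 1) + 1 := by omega
    conv_lhs => rw [h1]
    simp [refv, List.replicate_succ]
  | succ k ih =>
    have hk' : k ≤ sl.length - 1 := by omega
    rw [List.range'_1_concat, List.foldl_append, ih hk']
    simp only [List.foldl_cons, List.foldl_nil, show 1 + k = k + 1 from Nat.add_comm 1 k,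
      Nat.add_sub_cancel]
    set pi := (List.range (k + 1)).map (refv sl) ++ List.replicate (sl.length - (k + 1)) (0 : Int) with hpi
    have hgd : pi.getD k 0 = refv sl k := by
      rw [hpi, List.getD_append _ _ _ _ (by simp), List.getD_eq_getElem _ _ (by simp)]
      simp
    have hset : ∀ v : Int, pi.set (k + 1) v
        = (List.range (k + 1)).map (refv sl) ++ v :: List.replicate (sl.length - (k + 2)) (0 : Int) := by
      intro v
      have hrep : sl.length - (k + 1) = (sl.length - (k + 2)) + 1 := by omega
      rw [hpi, hrep, List.replicate_succ,
        show k + 1 = ((List.range (k + 1)).map (refv sl)).length from by simp]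
      simp
    have hrhs : (List.range (k + 1 + 1)).map (refv sl)
        = (List.range (k + 1)).map (refv sl) ++ [refv sl (k + 1)] := by
      rw [List.range_succ, List.map_append, List.map_singleton]
    rw [hgd]
    by_cases hEx : ∃ t ≤ (refv sl k).toNat, sl.getD t ' ' = sl.getD (k + 1) ' '
    · rw [if_pos ((prefixWhileA_iff sl _ _).mpr hEx)]
      have : refv sl (k + 1) = refv sl k + 1 := by
        rw [refv, if_pos]
        simp only [List.any_eq_true, List.mem_range, beq_iff_eq, Nat.lt_succ_iff]
        obtain ⟨t, ht, he⟩ := hEx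
        exact ⟨t, ht, he⟩
      rw [hset, hrhs, this]
      simp
    · rw [if_neg (fun h => hEx ((prefixWhileA_iff sl _ _).mp h))]
      have : refv sl (k + 1) = 0 := by
        rw [refv, if_neg]
        simp only [List.any_eq_true, List.mem_range, beq_iff_eq, Nat.lt_succ_iff]
        exact fun ⟨t, ht, he⟩ => hEx ⟨t, ht, he⟩
      rw [hset, hrhs, this]
      simp

lemma lemmaB (sl : List Char) (k : Nat) (hk : k ≤ sl.length) :
    ∃ first, InvFirst sl k first ∧
      (PySem.List.enumerate (sl.take k)).foldl
        (fun (st : PySem.Dict Char Int × Int × List Int) p =>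
          let first := if st.1.contains p.2 then st.1 else st.1.insert p.2 p.1
          let prev : Int := if p.1 = 0 then 0
                            else if first.getD p.2 0 ≤ st.2.1 then st.2.1 + 1 else 0
          (first, prev, st.2.2 ++ [prev]))
        (PySem.Dict.empty, 0, [])
      = (first, refv sl (k - 1), (List.range k).map (refv sl)) := by
  induction k with
  | zero =>
    refine ⟨PySem.Dict.empty, ?_, by simp [refv]⟩
    intro d
    refine ⟨fun _ t ht => absurd ht (by omega), fun j hj => ?_⟩
    rw [PySem.Dict.get?_empty] at hj; exact absurd hj (by simp)
  | succ k ih =>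
    have hklen : k < sl.length := by omega
    obtain ⟨first, hInv, hfold⟩ := ih (by omega)
    have hc : sl.getD k ' ' = sl[k] := List.getD_eq_getElem _ _ hklen
    rw [← List.take_append_getElem hklen, PySem.List.enumerate_append,
      List.foldl_append, hfold]
    simp only [PySem.List.enumerate, List.foldl_cons, List.foldl_nil,
      List.length_take, min_eq_left (le_of_lt hklen), zero_add]
    set c := sl[k] with hcdef
    set first' := (if first.contains c then first else first.insert c (k : Int)) with hf'
    have hInv' : InvFirst sl (k + 1) first' := by
      by_cases hcon : first.contains c
      · rw [hf', if_pos hcon]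
        intro d
        refine ⟨fun hnone t ht => ?_, fun j hj => ?_⟩
        · rcases Nat.lt_succ_iff_lt_or_eq.mp ht with h' | h'
          · exact (hInv d).1 hnone t h'
          · subst h'; rw [hc]
            intro hdc
            rw [← hdc] at hnone
            rw [PySem.Dict.contains_eq_isSome_get?, hnone] at hcon
            simp at hcon
        · obtain ⟨m, hm1, hm2, hm3, hm4⟩ := (hInv d).2 j hj
          exact ⟨m, hm1, by omega, hm3, hm4⟩
      · rw [hf', if_neg hcon]
        have hnone : first.get? c = none :=
          (PySem.Dict.get?_eq_none_iff_contains first c).mpr (by simpa using hcon)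
        intro d
        by_cases hd : d = c
        · subst hd
          refine ⟨fun h => ?_, fun j hj => ?_⟩
          · rw [PySem.Dict.get?_insert, if_pos rfl] at h; exact absurd h (by simp)
          · rw [PySem.Dict.get?_insert, if_pos rfl] at hj
            refine ⟨k, by exact (Option.some.injEq _ _).mp hj.symm, by omega, hc, ?_⟩
            exact (hInv c).1 hnone
        · refine ⟨fun h t ht => ?_, fun j hj => ?_⟩
          · rw [PySem.Dict.get?_insert, if_neg hd] at h
            rcases Nat.lt_succ_iff_lt_or_eq.mp ht with h' | h'
            · exact (hInv d).1 h t h'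
            · subst h'; rw [hc]; exact fun hdc => hd hdc.symm
          · rw [PySem.Dict.get?_insert, if_neg hd] at hj
            obtain ⟨m, hm1, hm2, hm3, hm4⟩ := (hInv d).2 j hj
            exact ⟨m, hm1, by omega, hm3, hm4⟩
    have hprev : (if (k : Int) = 0 then 0
        else if first'.getD c 0 ≤ refv sl (k - 1) then refv sl (k - 1) + 1 else 0)
        = refv sl k := by
      by_cases hk0 : k = 0
      · subst hk0; simp [refv]
      · rw [if_neg (by exact_mod_cast hk0)]
        -- first' surely contains c now: fetch the minimal occurrence
        have hcontains : first'.contains c = true := by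
          by_cases hcon : first.contains c
          · rw [hf', if_pos hcon]; exact hcon
          · rw [hf', if_neg hcon, PySem.Dict.contains_eq_isSome_get?,
              PySem.Dict.get?_insert, if_pos rfl]; rfl
        obtain ⟨j, hj⟩ : ∃ j, first'.get? c = some j := by
          rw [PySem.Dict.contains_eq_isSome_get?] at hcontains
          exact Option.isSome_iff_exists.mp hcontains
        obtain ⟨m, hm1, hm2, hm3, hm4⟩ := (hInv' c).2 j hj
        have hgd : first'.getD c 0 = (m : Int) := by
          rw [PySem.Dict.getD_eq_get?_getD, hj, hm1]; rfl
        have hnn := refv_nonneg sl (k - 1)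
        have hkk : k - 1 + 1 = k := by omega
        have hcond : (first'.getD c 0 ≤ refv sl (k - 1)) ↔
            ((List.range ((refv sl (k - 1)).toNat + 1)).any
              (fun t => sl.getD t ' ' == sl.getD (k - 1 + 1) ' ') = true) := by
          rw [hgd, hkk, hc]
          simp only [List.any_eq_true, List.mem_range, beq_iff_eq, Nat.lt_succ_iff]
          constructor
          · intro hle; exact ⟨m, by omega, hm3⟩
          · rintro ⟨t, ht, he⟩
            have : m ≤ t := by
              by_contra hlt
              exact hm4 t (by omega) he
            omega
        conv_rhs => rw [← hkk, refv]
        by_cases hco : first'.getD c 0 ≤ refv sl (k - 1)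
        · rw [if_pos hco, if_pos (hcond.mp hco)]
        · rw [if_neg hco, if_neg (fun h => hco (hcond.mpr h))]
    refine ⟨first', hInv', ?_⟩
    rw [hprev]
    have : (List.range (k + 1)).map (refv sl)
        = (List.range k).map (refv sl) ++ [refv sl k] := by
      rw [List.range_succ, List.map_append, List.map_singleton]
    rw [this, Nat.add_sub_cancel]

-- ===== VERDICT (by name: the statement is the Claim_ definition above) =====
theorem prefix_py_spec : Claim_equal_prefix_py := by
  intro s _
  unfold Spec_prefix_py prefix_py prefix_py_alt
  obtain ⟨first, _, hB⟩ := lemmaB s.toList s.toList.length (le_refl _)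
  rw [List.take_length] at hB
  rw [hB]
  rcases Nat.eq_zero_or_pos s.toList.length with h0 | hpos
  · simp [List.length_eq_zero_iff.mp h0]
  · have hA := lemmaA s.toList hpos (s.toList.length - 1) (le_refl _)
    have : s.toList.length - 1 + 1 = s.toList.length := by omega
    rw [this] at hA
    simp only [hA, Nat.sub_self, List.replicate_zero, List.append_nil]
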